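-- pv_equiv track=rewrite | github.com/msrovani/FARO | .windsurf/core/intelligence/self_improving_code_generator.py | _add_docstrings
-- ===== SOURCE A (Python) =====
-- def _add_docstrings(code: str, language: str) -> str:
--     """Add docstrings to code"""
--     # Simple docstring addition
--     lines = code.split("\\n")
--     improved_lines = []
--
--     for i, line in enumerate(lines):
--         improved_lines.append(line)
--
--         # Add docstring after function/class definition
--         if language == "python":
--             if line.strip().startswith("def ") or line.strip().startswith("class "):
--                 improved_lines.append('    """')
--                 improved_lines.append('    TODO: Add docstring')
--                 improved_lines.append('    """')
--
--     return "\\n".join(improved_lines)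
-- ===== SOURCE B (Python) =====
-- def _add_docstrings(code: str, language: str) -> str:
--     """Add docstrings to code"""
--     if language != "python":
--         return code
--     # Single scan over the raw string: cut at each literal "\n" separator
--     # (exactly the separator A splits on) and emit the docstring block as one
--     # pre-joined chunk right after a matching def/class segment.
--     DOC = '\\n    """\\n    TODO: Add docstring\\n    """'
--     out = []
--     rest = code
--     while True:
--         cut = rest.find("\\n")
--         seg = rest if cut == -1 else rest[:cut]
--         out.append(seg)
--         if seg.strip().startswith(("def ", "class ")):
--             out.append(DOC)
--         if cut == -1:
--             return "".join(out)
--         out.append("\\n")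
--         rest = rest[cut + 2:]
-- ===== Notes on version B (the rewrite author's own statement) =====
-- stated objective: alternative
-- what changed: B replaces A's split-into-a-list-of-lines / indexed loop with a growing list accumulator / re-join pipeline by an early return for non-python languages and a single find-driven scan over the raw string that cuts at each separator occurrence and emits the docstring block as one pre-joined chunk into a flat output buffer.
import Mathlib
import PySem

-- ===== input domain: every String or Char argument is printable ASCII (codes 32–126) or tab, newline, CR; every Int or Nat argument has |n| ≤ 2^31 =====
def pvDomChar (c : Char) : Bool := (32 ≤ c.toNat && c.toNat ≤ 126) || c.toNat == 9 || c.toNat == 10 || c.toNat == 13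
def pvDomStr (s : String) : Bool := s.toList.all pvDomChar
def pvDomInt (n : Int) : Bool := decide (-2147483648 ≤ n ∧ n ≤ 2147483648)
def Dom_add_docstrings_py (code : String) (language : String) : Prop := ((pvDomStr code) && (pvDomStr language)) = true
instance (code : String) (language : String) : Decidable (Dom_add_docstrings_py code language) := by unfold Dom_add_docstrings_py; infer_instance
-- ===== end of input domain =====

-- B replaces A's split-into-a-list / loop-with-accumulator / re-join pipeline by a single
-- find-driven scan over the raw string that emits the docstring block as one pre-joined chunk
-- and returns the input unchanged for non-python languages (objective: alternative, not faster).
-- NOTE (faithful to the source): A splits on the two-character literal backslash+'n' ("\\n" in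
-- the Python source), not on real newlines; both ports and B reproduce exactly that.

-- ===== PORT A =====
-- the separator A splits and joins on: the two characters '\' 'n'
def pvSep : List Char := ['\\', 'n']

def pvCondA (line : List Char) : Bool :=
  PySem.Chars.startswith (PySem.Chars.strip line) "def ".toList ||
  PySem.Chars.startswith (PySem.Chars.strip line) "class ".toList

def pvDocLinesA : List (List Char) :=
  ["    \"\"\"".toList, "    TODO: Add docstring".toList, "    \"\"\"".toList]

def add_docstrings_py (code : String) (language : String) : String :=
  let lines := PySem.Chars.splitOn code.toList pvSep
  let improved := lines.foldl (fun acc line =>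
      let acc2 := acc ++ [line]
      if language == "python" then
        if pvCondA line then acc2 ++ pvDocLinesA else acc2
      else acc2) ([] : List (List Char))
  String.ofList (PySem.Chars.join pvSep improved)

-- ===== PORT B =====
def pvCondB (seg : List Char) : Bool :=
  PySem.Chars.startswith (PySem.Chars.strip seg) "def ".toList ||
  PySem.Chars.startswith (PySem.Chars.strip seg) "class ".toList

-- the pre-joined docstring chunk DOC of Source B
def pvDocB : List Char := "\\n    \"\"\"\\n    TODO: Add docstring\\n    \"\"\"".toList

-- needed for pvLoopB's termination
theorem pvFind_sep_length {rest : List Char} (h : ¬ PySem.Chars.find rest pvSep = -1) :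
    2 ≤ rest.length := by
  have h0 : 0 ≤ PySem.Chars.find rest pvSep := by
    have := PySem.Chars.neg_one_le_find rest pvSep
    omega
  have hinf : pvSep <:+: rest := (PySem.Chars.find_nonneg_iff rest pvSep).mp h0
  have := hinf.length_le
  simpa [pvSep] using this

-- the while-loop of Source B: cut `rest` at the first "\n"-literal, append the segment,
-- the DOC chunk when the segment matches, and the separator; recurse on the remainder
def pvLoopB (rest : List Char) : List Char :=
  let cut := PySem.Chars.find rest pvSep
  if h : cut = -1 then
    rest ++ (if pvCondB rest then pvDocB else [])
  else
    rest.take cut.toNat ++ (if pvCondB (rest.take cut.toNat) then pvDocB else [])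
      ++ pvSep ++ pvLoopB (rest.drop (cut.toNat + 2))
termination_by rest.length
decreasing_by
  have := pvFind_sep_length h
  simp only [List.length_drop]
  omega

def add_docstrings_py_alt (code : String) (language : String) : String :=
  if language == "python" then String.ofList (pvLoopB code.toList) else code

-- ===== PRECONDITION & SPEC =====
def Spec_add_docstrings_py (code : String) (language : String) (out : String) : Prop := out = add_docstrings_py_alt code language
instance (code : String) (language : String) (out : String) : Decidable (Spec_add_docstrings_py code language out) := by unfold Spec_add_docstrings_py; infer_instance

-- ===== CLAIM (what is proved, stated in full; the proofs are below) =====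
def Claim_equal_add_docstrings_py : Prop := ∀ (code : String) (language : String), Dom_add_docstrings_py code language → Spec_add_docstrings_py code language (add_docstrings_py code language)

-- ===== LEMMAS AND PROOFS =====

-- functional characterisation of splitting on pvSep, following Chars.find
def pvSplitF (cs : List Char) : List (List Char) :=
  if h : PySem.Chars.find cs pvSep = -1 then [cs]
  else cs.take (PySem.Chars.find cs pvSep).toNat ::
    pvSplitF (cs.drop ((PySem.Chars.find cs pvSep).toNat + 2))
termination_by cs.length
decreasing_by
  have := pvFind_sep_length h
  simp only [List.length_drop]
  omega

theorem pvSplitF_ne_nil (cs : List Char) : pvSplitF cs ≠ [] := by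
  rw [pvSplitF]
  split <;> simp

-- find points at k when k is the first occurrence
theorem pvFind_eq_of_first {cs : List Char} {k : Nat}
    (hk : pvSep <+: cs.drop k) (hmin : ∀ i < k, ¬ pvSep <+: cs.drop i) :
    PySem.Chars.find cs pvSep = (k : Int) := by
  have h0 : 0 ≤ PySem.Chars.find cs pvSep := by
    rw [PySem.Chars.find_nonneg_iff]
    exact ⟨cs.take k, cs.drop (k + 2) , by
      rcases hk with ⟨t, ht⟩
      calc cs.take k ++ pvSep ++ (cs.drop (k+2)) = cs.take k ++ (pvSep ++ cs.drop (k+2)) := by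
              simp [List.append_assoc]
        _ = cs := by
              have h2 : cs.drop (k + 2) = t := by
                have hd : cs.drop (k + 2) = (cs.drop k).drop 2 := by
                  rw [List.drop_drop]
                rw [hd, ← ht]; simp [pvSep]
              rw [h2, ht, List.take_append_drop]⟩
  obtain ⟨hfst, hmin'⟩ := PySem.Chars.find_spec h0
  by_contra hne
  have hcast : ((PySem.Chars.find cs pvSep).toNat : Int) = PySem.Chars.find cs pvSep :=
    Int.toNat_of_nonneg h0
  have hnek : (PySem.Chars.find cs pvSep).toNat ≠ k := fun hkk => hne (by rw [← hcast, hkk])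
  rcases Nat.lt_or_ge (PySem.Chars.find cs pvSep).toNat k with hlt | hge
  · exact hmin _ hlt hfst
  · exact hmin' _ (by omega) hk

-- the recursion of Chars.splitOn.go, characterised by pvSplitF
-- no occurrence anywhere in cs means find cs pvSep = -1
theorem pvFind_neg_of_no_prefix {cs : List Char}
    (H : ∀ i, ¬ pvSep <+: cs.drop i) : PySem.Chars.find cs pvSep = -1 := by
  rw [PySem.Chars.find_eq_neg_one_iff]
  intro hinf
  obtain ⟨j, hj⟩ := (PySem.Chars.exists_prefix_drop_iff_isIn pvSep cs).mpr
    ((PySem.Chars.isIn_iff_infix pvSep cs).mpr hinf)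
  exact H j hj

theorem pvGo_spec : ∀ (fuel : Nat) (l cur : List Char) (acc : List (List Char)),
    l.length < fuel →
    (∀ i < cur.length, ¬ pvSep <+: (cur.reverse ++ l).drop i) →
    PySem.Chars.splitOn.go pvSep fuel l cur acc = acc.reverse ++ pvSplitF (cur.reverse ++ l) := by
  intro fuel
  induction fuel with
  | zero => intro l cur acc hfuel _; omega
  | succ f ih =>
    intro l cur acc hfuel H
    cases l with
    | nil =>
      have hfind : PySem.Chars.find (cur.reverse ++ []) pvSep = -1 := by
        apply pvFind_neg_of_no_prefix
        intro i hpre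
        rcases Nat.lt_or_ge i cur.length with hlt | hge
        · exact H i hlt hpre
        · have hlen := hpre.length_le
          simp [pvSep] at hlen
          omega
      rw [PySem.Chars.splitOn.go, pvSplitF]
      · simp only [hfind]
        simp
      · omega
    | cons c rest =>
      rw [PySem.Chars.splitOn.go]
      by_cases hp : pvSep.isPrefixOf (c :: rest)
      · simp only [hp, if_true]
        have hpre : pvSep <+: (c :: rest) := List.isPrefixOf_iff_prefix.mp hp
        have hrest : rest.length < f := by simp at hfuel; omega
        rw [ih _ [] _ (by simp [pvSep]; omega) (by simp)]
        have hfind : PySem.Chars.find (cur.reverse ++ c :: rest) pvSep = (cur.length : Int) := by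
          apply pvFind_eq_of_first
          · rw [← List.length_reverse (as := cur), List.drop_left]
            exact hpre
          · exact H
        conv_rhs => rw [pvSplitF]
        have h1 : ((cur.length : Int)).toNat = cur.length := rfl
        have h2 : (cur.reverse ++ c :: rest).take cur.length = cur.reverse := by
          rw [← List.length_reverse (as := cur)]; exact List.take_left
        have h3 : (cur.reverse ++ c :: rest).drop (cur.length + 2) = (c :: rest).drop 2 := by
          conv_lhs => rw [← List.length_reverse (as := cur)]
          rw [← List.drop_drop, List.drop_left]
        simp only [hfind, h1, h2, h3]
        simp [pvSep]
      · simp only [hp]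
        have hnp : ¬ pvSep <+: (c :: rest) := fun hc => hp (List.isPrefixOf_iff_prefix.mpr hc)
        have := ih rest (c :: cur) acc (by simp at hfuel; omega) ?_
        · simpa using this
        · intro i hi
          simp only [List.reverse_cons, List.append_assoc, List.singleton_append]
          rcases Nat.lt_or_ge i cur.length with hlt | hge
          · have := H i hlt
            simpa using this
          · have hieq : i = cur.length := by simp at hi; omega
            subst hieq
            rw [← List.length_reverse (as := cur), List.drop_left]
            exact hnp

theorem pvSplitOn_eq (cs : List Char) : PySem.Chars.splitOn cs pvSep = pvSplitF cs := by
  have := pvGo_spec (cs.length + 1) cs [] [] (by omega) (by simp)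
  simpa [PySem.Chars.splitOn] using this

theorem pvJoin_cons (a : List Char) (bs : List (List Char)) (h : bs ≠ []) :
    PySem.Chars.join pvSep (a :: bs) = a ++ pvSep ++ PySem.Chars.join pvSep bs := by
  cases bs with
  | nil => exact absurd rfl h
  | cons b bs' => exact PySem.Chars.join_cons_cons pvSep a b bs'

-- a string with an occurrence of the separator decomposes around its first occurrence
theorem pvDecomp {cs : List Char} (h : ¬ PySem.Chars.find cs pvSep = -1) :
    cs.take (PySem.Chars.find cs pvSep).toNat ++ pvSep
      ++ cs.drop ((PySem.Chars.find cs pvSep).toNat + 2) = cs := by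
  have h0 : 0 ≤ PySem.Chars.find cs pvSep := by
    have := PySem.Chars.neg_one_le_find cs pvSep; omega
  obtain ⟨hfst, -⟩ := PySem.Chars.find_spec h0
  rcases hfst with ⟨t, ht⟩
  have h2 : cs.drop ((PySem.Chars.find cs pvSep).toNat + 2) = t := by
    have hd : cs.drop ((PySem.Chars.find cs pvSep).toNat + 2)
        = (cs.drop (PySem.Chars.find cs pvSep).toNat).drop 2 := by rw [List.drop_drop]
    rw [hd, ← ht]; simp [pvSep]
  rw [h2, List.append_assoc, ht, List.take_append_drop]

-- re-joining the split with the separator restores the string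
theorem pvJoin_splitF (cs : List Char) : PySem.Chars.join pvSep (pvSplitF cs) = cs := by
  fun_induction pvSplitF cs with
  | case1 cs h => exact PySem.Chars.join_singleton _ _
  | case2 cs h ih =>
    rw [pvJoin_cons _ _ (pvSplitF_ne_nil _), List.append_assoc, ih, ← List.append_assoc,
      pvDecomp h]

-- per-segment expansion performed by A's loop body in the python case
def pvG (seg : List Char) : List (List Char) :=
  seg :: (if pvCondA seg then pvDocLinesA else [])

theorem pvDocB_eq :
    pvDocB = pvSep ++ "    \"\"\"".toList ++ pvSep ++ "    TODO: Add docstring".toList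
      ++ pvSep ++ "    \"\"\"".toList := by decide

theorem pvCond_eq : pvCondB = pvCondA := rfl

theorem pvFlat_ne_nil {ps : List (List Char)} (h : ps ≠ []) : ps.flatMap pvG ≠ [] := by
  cases ps with
  | nil => exact absurd rfl h
  | cons p ps' => simp [pvG]

theorem pvLoopB_eq (cs : List Char) :
    pvLoopB cs = PySem.Chars.join pvSep ((pvSplitF cs).flatMap pvG) := by
  fun_induction pvLoopB cs with
  | case1 cs cut hcut =>
    have hceq : cut = PySem.Chars.find cs pvSep := rfl
    have hf : PySem.Chars.find cs pvSep = -1 := hceq ▸ hcut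
    clear_value cut
    subst hceq
    rw [pvSplitF, dif_pos hf]
    simp only [List.flatMap_cons, List.flatMap_nil, List.append_nil, pvG, pvCond_eq]
    by_cases hc : pvCondA cs = true
    case neg => simp [hc, PySem.Chars.join_singleton]
    case pos =>
      simp only [hc, if_true, pvDocLinesA, pvDocB_eq]
      rw [PySem.Chars.join_cons_cons, PySem.Chars.join_cons_cons, PySem.Chars.join_cons_cons,
        PySem.Chars.join_singleton]
      simp [List.append_assoc]
  | case2 cs cut hcut ih =>
    have hceq : cut = PySem.Chars.find cs pvSep := rfl
    have hf : ¬ PySem.Chars.find cs pvSep = -1 := hceq ▸ hcut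
    clear_value cut
    subst hceq
    conv_rhs => rw [pvSplitF]
    rw [dif_neg hf]
    simp only [List.flatMap_cons, pvG, pvCond_eq]
    have hne := pvFlat_ne_nil (pvSplitF_ne_nil (cs.drop ((PySem.Chars.find cs pvSep).toNat + 2)))
    by_cases hc : pvCondA (cs.take (PySem.Chars.find cs pvSep).toNat) = true
    case neg =>
      simp only [Bool.not_eq_true] at hc
      simp only [hc, Bool.false_eq_true, if_false, List.append_nil, List.cons_append,
        List.nil_append]
      rw [pvJoin_cons _ _ hne, ih]
    case pos =>
      simp only [hc, if_true, pvDocLinesA]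
      rw [show ((cs.take (PySem.Chars.find cs pvSep).toNat
          :: ["    \"\"\"".toList, "    TODO: Add docstring".toList, "    \"\"\"".toList])
          ++ (pvSplitF (cs.drop ((PySem.Chars.find cs pvSep).toNat + 2))).flatMap pvG)
        = cs.take (PySem.Chars.find cs pvSep).toNat :: "    \"\"\"".toList
          :: "    TODO: Add docstring".toList :: "    \"\"\"".toList
          :: (pvSplitF (cs.drop ((PySem.Chars.find cs pvSep).toNat + 2))).flatMap pvG by simp]
      rw [PySem.Chars.join_cons_cons, PySem.Chars.join_cons_cons, PySem.Chars.join_cons_cons,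
        pvJoin_cons _ _ hne, ih, pvDocB_eq]
      simp [List.append_assoc]

-- ===== VERDICT (by name: the statement is the Claim_ definition above) =====
theorem add_docstrings_py_spec : Claim_equal_add_docstrings_py := by
  intro code language _
  unfold Spec_add_docstrings_py add_docstrings_py add_docstrings_py_alt
  by_cases hl : language = "python"
  · simp only [hl, beq_self_eq_true, if_true]
    rw [show (fun (acc : List (List Char)) line =>
        if pvCondA line = true then acc ++ [line] ++ pvDocLinesA else acc ++ [line])
        = fun acc line => acc ++ pvG line by
      funext acc line; simp only [pvG]; split <;> simp]
    rw [PySem.List.foldl_append_eq_flatMap, List.nil_append, pvSplitOn_eq, ← pvLoopB_eq]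
  · have hne : (language == "python") = false := by simp [hl]
    simp only [hne, Bool.false_eq_true, if_false]
    rw [pvSplitOn_eq, PySem.List.foldl_append_singleton, List.nil_append, pvJoin_splitF]
    simp
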